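-- pv_equiv track=rewrite | github.com/muyeqingfeng/python_practice | chap01_2.py | viral_communication_speed
-- ===== SOURCE A (Python) =====
-- def viral_communication_speed(etime, num=1):
-- 	"""
-- 	病毒 传播 速度
-- 	num: 开始病毒感染人数
-- 	dtime: 第 dtime 天
-- 	"""
-- 	dtime = 0  #间隔时间
-- 	stime = 0  #初始化时间
-- 	people = [num] #感染人数
--
-- 	while dtime < etime:
-- 		dtime += 1
-- 		if (dtime - stime) % 5 == 0:
-- 			num = 2*num + num
-- 			people.append(num)
-- 		else:
-- 			num = num
-- 			people.append(num)
--
-- 	return people[-1]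
-- ===== SOURCE B (Python) =====
-- def viral_communication_speed(etime, num=1):
--     """Closed form: the count triples once per completed 5-day period."""
--     if etime <= 0:
--         return num
--     return num * 3 ** (etime // 5)
-- ===== Notes on version B (the rewrite author's own statement) =====
-- stated objective: faster
-- what changed: Replaces the day-by-day loop that appends to a list with the closed form num * 3**(etime//5).
import Mathlib
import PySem

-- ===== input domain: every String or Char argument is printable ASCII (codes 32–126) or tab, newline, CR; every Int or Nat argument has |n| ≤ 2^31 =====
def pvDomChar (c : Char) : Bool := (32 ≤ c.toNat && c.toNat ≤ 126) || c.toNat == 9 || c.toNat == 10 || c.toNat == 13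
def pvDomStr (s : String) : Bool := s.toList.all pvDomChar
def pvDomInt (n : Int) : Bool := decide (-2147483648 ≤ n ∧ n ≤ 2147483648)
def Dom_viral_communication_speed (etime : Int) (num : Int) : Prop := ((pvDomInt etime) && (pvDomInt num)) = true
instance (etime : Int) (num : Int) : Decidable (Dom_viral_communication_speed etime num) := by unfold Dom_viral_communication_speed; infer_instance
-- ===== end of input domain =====

-- B replaces A's day-by-day loop with the closed form num * 3^(etime//5) (faster, asymptotically fewer steps).


-- ===== PORT A =====
-- the while loop: fuel = number of remaining iterations (etime - dtime); state (dtime, num, people)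
def vcsLoop : Nat → Int → Int → List Int → List Int
  | 0, _, _, people => people
  | f + 1, dtime, num, people =>
    let dtime' := dtime + 1
    if PySem.Int.mod (dtime' - 0) 5 = 0 then
      vcsLoop f dtime' (2 * num + num) (people ++ [2 * num + num])
    else
      vcsLoop f dtime' num (people ++ [num])

def viral_communication_speed (etime : Int) (num : Int) : Int :=
  -- people[-1]: the list is never empty, getLast?.getD 0 returns its last element
  ((vcsLoop (etime - 0).toNat 0 num [num]).getLast?).getD 0

-- ===== PORT B =====
def viral_communication_speed_alt (etime : Int) (num : Int) : Int :=
  if etime ≤ 0 then num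
  else num * 3 ^ (PySem.Int.floordiv etime 5).toNat

-- ===== PRECONDITION & SPEC =====
def Spec_viral_communication_speed (etime : Int) (num : Int) (out : Int) : Prop := out = viral_communication_speed_alt etime num
instance (etime : Int) (num : Int) (out : Int) : Decidable (Spec_viral_communication_speed etime num out) := by unfold Spec_viral_communication_speed; infer_instance

-- ===== CLAIM (what is proved, stated in full; the proofs are below) =====
def Claim_equal_viral_communication_speed : Prop := ∀ (etime : Int) (num : Int), Dom_viral_communication_speed etime num → Spec_viral_communication_speed etime num (viral_communication_speed etime num)

-- ===== LEMMAS AND PROOFS =====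

-- loop invariant: last of the result = num tripled once per multiple of 5 in (d, d+f]
theorem vcsLoop_last (f : Nat) : ∀ (d : Nat) (num : Int) (ppl : List Int),
    ((vcsLoop f (d : Int) num (ppl ++ [num])).getLast?).getD 0
      = num * 3 ^ ((d + f) / 5 - d / 5) := by
  induction f with
  | zero =>
    intro d num ppl
    simp [vcsLoop]
  | succ f ih =>
    intro d num ppl
    have hcast : (d : Int) + 1 = ((d + 1 : Nat) : Int) := by push_cast; ring
    have hmod : PySem.Int.mod ((d : Int) + 1 - 0) 5 = (((d + 1) % 5 : Nat) : Int) := by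
      rw [show ((d : Int) + 1 - 0) = ((d + 1 : Nat) : Int) by push_cast; ring]
      exact PySem.Int.mod_natCast (d + 1) 5
    by_cases h : (d + 1) % 5 = 0
    · have : PySem.Int.mod ((d : Int) + 1 - 0) 5 = 0 := by rw [hmod, h]; rfl
      rw [vcsLoop, if_pos this]
      have := ih (d + 1) (2 * num + num) (ppl ++ [num])
      rw [hcast, List.append_assoc] at *
      rw [this]
      have hexp : (d + 1 + f) / 5 - (d + 1) / 5 + 1 = (d + (f + 1)) / 5 - d / 5 := by omega
      rw [show (2 * num + num) = num * 3 by ring, mul_assoc, ← pow_succ', hexp]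
    · have : ¬ PySem.Int.mod ((d : Int) + 1 - 0) 5 = 0 := by
        rw [hmod]; exact_mod_cast fun hc => h (by exact_mod_cast hc)
      rw [vcsLoop, if_neg this]
      have := ih (d + 1) num (ppl ++ [num])
      rw [hcast, List.append_assoc] at *
      rw [this]
      have hexp : (d + 1 + f) / 5 - (d + 1) / 5 = (d + (f + 1)) / 5 - d / 5 := by omega
      rw [hexp]

-- ===== VERDICT (by name: the statement is the Claim_ definition above) =====
theorem viral_communication_speed_spec : Claim_equal_viral_communication_speed := by
  intro etime num _
  unfold Spec_viral_communication_speed viral_communication_speed viral_communication_speed_alt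
  have h := vcsLoop_last (etime - 0).toNat 0 num []
  simp only [Nat.cast_zero, List.nil_append, Nat.zero_add, Nat.zero_div, Nat.sub_zero] at h
  rw [h]
  by_cases he : etime ≤ 0
  · rw [if_pos he]
    have : etime.toNat = 0 := by omega
    simp [this]
  · rw [if_neg he]
    have h5 : PySem.Int.floordiv etime 5 = etime / 5 :=
      PySem.Int.floordiv_eq_ediv_of_pos (by omega)
    have : (etime / 5).toNat = (etime - 0).toNat / 5 := by omega
    rw [h5, this]
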